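-- pv_equiv track=rewrite | github.com/lorenzopalaia/Advent-of-Code-2024 | 22/solution.py | simulate_secret_generation
-- ===== SOURCE A (Python) =====
-- def generate_next_secret(secret: int):
--     secret = (secret ^ (secret << 6)) & 0xFF_FFFF
--     secret = (secret ^ (secret >> 5)) & 0xFF_FFFF
--     secret = (secret ^ (secret << 11)) & 0xFF_FFFF
--     return secret
--
-- def simulate_secret_generation(seed: int, iterations: int) -> tuple[int, dict[int, int]]:
--     price_changes = {}
--     secret = seed
--     last_digit = seed % 10
--
--     change_history = 0
--
--     for i in range(iterations):
--         next_secret = generate_next_secret(secret)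
--         next_digit = next_secret % 10
--
--         change_history = ((change_history << 8) | (
--             (next_digit - last_digit) % 256)) & 0xffff_ffff
--
--         if i >= 3:
--             if change_history not in price_changes:
--                 price_changes[change_history] = next_digit
--         secret = next_secret
--         last_digit = next_digit
--
--     return secret, price_changes
-- ===== SOURCE B (Python) =====
-- def _next_secret(secret: int):
--     secret = (secret ^ (secret << 6)) & 0xFF_FFFF
--     secret = (secret ^ (secret >> 5)) & 0xFF_FFFF
--     secret = (secret ^ (secret << 11)) & 0xFF_FFFF
--     return secret
--
-- def simulate_secret_generation(seed: int, iterations: int):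
--     # pass 1: generate all price digits
--     secret = seed
--     digits = [seed % 10]
--     for _ in range(iterations):
--         secret = _next_secret(secret)
--         digits.append(secret % 10)
--     # pass 2: slide a 4-difference window, repacking the key from scratch each time
--     price_changes = {}
--     for i in range(3, iterations):
--         key = 0
--         for j in range(i - 2, i + 2):
--             key = (key << 8) | ((digits[j] - digits[j - 1]) % 256)
--         price_changes.setdefault(key, digits[i + 1])
--     return secret, price_changes
-- ===== Notes on version B (the rewrite author's own statement) =====
-- stated objective: alternative
-- what changed: Replaces A's single fused loop carrying a running 32-bit packed change-history through the dict updates by two separate passes: one pass generates the price-digit sequence, a second pass slides a 4-difference window over it and repacks each dict key from scratch.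
import Mathlib
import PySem

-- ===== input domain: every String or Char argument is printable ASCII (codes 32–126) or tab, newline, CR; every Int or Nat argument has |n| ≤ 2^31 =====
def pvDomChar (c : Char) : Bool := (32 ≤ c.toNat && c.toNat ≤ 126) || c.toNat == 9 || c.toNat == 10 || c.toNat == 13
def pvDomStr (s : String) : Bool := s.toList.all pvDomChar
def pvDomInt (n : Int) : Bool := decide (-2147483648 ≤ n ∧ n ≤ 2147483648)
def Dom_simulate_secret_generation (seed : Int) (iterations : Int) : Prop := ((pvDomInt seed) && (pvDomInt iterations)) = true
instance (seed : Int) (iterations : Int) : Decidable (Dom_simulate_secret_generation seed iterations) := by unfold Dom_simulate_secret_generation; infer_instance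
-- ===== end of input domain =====

-- B replaces A's single fused loop (running packed change-history + dict updates in one pass) by two
-- separate passes: generate the digit sequence first, then slide a 4-difference window repacking each
-- dict key from scratch (objective: alternative decomposition, same O(n) cost).

-- ===== PORT A =====
def generate_next_secret (secret : Int) : Int :=
  let s1 := PySem.Int.band (PySem.Int.bxor secret (secret <<< (6:Nat))) 0xFFFFFF
  let s2 := PySem.Int.band (PySem.Int.bxor s1 (s1 >>> (5:Nat))) 0xFFFFFF
  PySem.Int.band (PySem.Int.bxor s2 (s2 <<< (11:Nat))) 0xFFFFFF

/-- the body of A's `for i in range(iterations)` loop; state = (price_changes, secret, last_digit, change_history) -/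
def pvStepA (st : PySem.Dict Int Int × Int × Int × Int) (i : Int) : PySem.Dict Int Int × Int × Int × Int :=
  let pc := st.1
  let secret := st.2.1
  let last_digit := st.2.2.1
  let change_history := st.2.2.2
  let next_secret := generate_next_secret secret
  let next_digit := PySem.Int.mod next_secret 10
  let ch' := PySem.Int.band (PySem.Int.bor (change_history <<< (8:Nat))
                (PySem.Int.mod (next_digit - last_digit) 256)) 0xffffffff
  let pc' := if 3 ≤ i then (if pc.contains ch' then pc else pc.insert ch' next_digit) else pc
  (pc', next_secret, next_digit, ch')

def simulate_secret_generation (seed : Int) (iterations : Int) : Int × (List (Int × Int)) :=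
  let st := (PySem.List.pyRange 0 iterations 1).foldl pvStepA
    (PySem.Dict.empty, seed, PySem.Int.mod seed 10, 0)
  (st.2.1, st.1.items)

-- ===== PORT B =====
def pvNextSecret (secret : Int) : Int :=
  let s1 := PySem.Int.band (PySem.Int.bxor secret (secret <<< (6:Nat))) 0xFFFFFF
  let s2 := PySem.Int.band (PySem.Int.bxor s1 (s1 >>> (5:Nat))) 0xFFFFFF
  PySem.Int.band (PySem.Int.bxor s2 (s2 <<< (11:Nat))) 0xFFFFFF

/-- B's pass 1 step: advance the secret, append its price digit -/
def pvPass1Step (st : Int × List Int) (_i : Int) : Int × List Int :=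
  let ns := pvNextSecret st.1
  (ns, st.2 ++ [PySem.Int.mod ns 10])

/-- B's pass 2 step: repack the key of window `i` from the digit list, record it if absent -/
def pvPass2Step (digits : List Int) (pc : PySem.Dict Int Int) (i : Int) : PySem.Dict Int Int :=
  let key := (PySem.List.pyRange (i - 2) (i + 2) 1).foldl
    (fun k j => PySem.Int.bor (k <<< (8:Nat))
      (PySem.Int.mod (PySem.List.pyGetD digits j 0 - PySem.List.pyGetD digits (j - 1) 0) 256)) 0
  pc.setdefault key (PySem.List.pyGetD digits (i + 1) 0)

def simulate_secret_generation_alt (seed : Int) (iterations : Int) : Int × (List (Int × Int)) :=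
  let p1 := (PySem.List.pyRange 0 iterations 1).foldl pvPass1Step (seed, [PySem.Int.mod seed 10])
  let pc := (PySem.List.pyRange 3 iterations 1).foldl (pvPass2Step p1.2) PySem.Dict.empty
  (p1.1, pc.items)

-- ===== PRECONDITION & SPEC =====
def Spec_simulate_secret_generation (seed : Int) (iterations : Int) (out : Int × (List (Int × Int))) : Prop := out = simulate_secret_generation_alt seed iterations
instance (seed : Int) (iterations : Int) (out : Int × (List (Int × Int))) : Decidable (Spec_simulate_secret_generation seed iterations out) := by unfold Spec_simulate_secret_generation; infer_instance

-- ===== CLAIM (what is proved, stated in full; the proofs are below) =====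
def Claim_equal_simulate_secret_generation : Prop := ∀ (seed : Int) (iterations : Int), Dom_simulate_secret_generation seed iterations → Spec_simulate_secret_generation seed iterations (simulate_secret_generation seed iterations)

-- ===== LEMMAS AND PROOFS =====

/-- the secret after `k` PRNG steps -/
def pvSec (seed : Int) : Nat → Int
  | 0 => seed
  | k + 1 => generate_next_secret (pvSec seed k)

/-- the price digit after `k` steps -/
def pvDig (seed : Int) (k : Nat) : Int := PySem.Int.mod (pvSec seed k) 10

/-- the byte-encoded digit difference at step `k` -/
def pvDel (seed : Int) (k : Nat) : Int := PySem.Int.mod (pvDig seed (k + 1) - pvDig seed k) 256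

/-- A's change_history after `k` iterations -/
def pvH (seed : Int) : Nat → Int
  | 0 => 0
  | k + 1 => PySem.Int.band (PySem.Int.bor (pvH seed k <<< (8:Nat)) (pvDel seed k)) 0xffffffff

/-- A's dict after `k` iterations -/
def pvP (seed : Int) : Nat → PySem.Dict Int Int
  | 0 => PySem.Dict.empty
  | k + 1 =>
      if 3 ≤ k then
        (if (pvP seed k).contains (pvH seed (k + 1)) then pvP seed k
         else (pvP seed k).insert (pvH seed (k + 1)) (pvDig seed (k + 1)))
      else pvP seed k

theorem pvDel_bounds (seed : Int) (k : Nat) : 0 ≤ pvDel seed k ∧ pvDel seed k < 256 :=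
  ⟨PySem.Int.mod_nonneg _ (by norm_num), PySem.Int.mod_lt _ (by norm_num)⟩

/-- the unmasked packing step is plain arithmetic -/
theorem pvOr_eq (h d : Int) (hh : 0 ≤ h) (hd0 : 0 ≤ d) (hd : d < 256) :
    PySem.Int.bor (h <<< (8:Nat)) d = h * 256 + d := by
  obtain ⟨a, rfl⟩ := Int.eq_ofNat_of_zero_le hh
  obtain ⟨b, rfl⟩ := Int.eq_ofNat_of_zero_le hd0
  have hb : b < 2 ^ 8 := by exact_mod_cast hd
  rw [Int.shiftLeft_eq]
  have h1 : ((a : Int)) * 2 ^ 8 = ((a * 2 ^ 8 : Nat) : Int) := by push_cast; ring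
  have h2 : (a * 2 ^ 8) ||| b = a * 2 ^ 8 + b := by
    rw [← Nat.shiftLeft_eq, ← Nat.shiftLeft_add_eq_or_of_lt hb]
  rw [h1, PySem.Int.bor_natCast, h2]
  push_cast; ring

/-- the masked running-history step is plain modular arithmetic -/
theorem pvStep_eq (h d : Int) (hh : 0 ≤ h) (hd0 : 0 ≤ d) (hd : d < 256) :
    PySem.Int.band (PySem.Int.bor (h <<< (8:Nat)) d) 0xffffffff = (h * 256 + d) % 4294967296 := by
  rw [pvOr_eq h d hh hd0 hd]
  have hnn : 0 ≤ h * 256 + d := by omega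
  obtain ⟨m, hm⟩ := Int.eq_ofNat_of_zero_le hnn
  rw [hm]
  have hlit : (4294967295 : Int) = ((4294967295 : Nat) : Int) := by norm_num
  have h2 : m &&& 4294967295 = m % 2 ^ 32 := by
    have e : (4294967295 : Nat) = 2 ^ 32 - 1 := by norm_num
    rw [e, Nat.and_two_pow_sub_one_eq_mod]
  rw [hlit, PySem.Int.band_natCast, h2]
  push_cast; norm_num

theorem pvH_nonneg (seed : Int) (k : Nat) : 0 ≤ pvH seed k := by
  induction k with
  | zero => simp [pvH]
  | succ k ih =>
    simp only [pvH]
    rw [pvStep_eq _ _ ih (pvDel_bounds seed k).1 (pvDel_bounds seed k).2]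
    exact Int.emod_nonneg _ (by norm_num)

theorem pvH_succ (seed : Int) (k : Nat) :
    pvH seed (k + 1) = (pvH seed k * 256 + pvDel seed k) % 4294967296 :=
  pvStep_eq _ _ (pvH_nonneg seed k) (pvDel_bounds seed k).1 (pvDel_bounds seed k).2

/-- past the third step, the masked running history is exactly the pack of the last four differences -/
theorem pvH_window (seed : Int) (p : Nat) :
    pvH seed (p + 4) =
      ((pvDel seed p * 256 + pvDel seed (p + 1)) * 256 + pvDel seed (p + 2)) * 256 + pvDel seed (p + 3) := by
  have b0 := pvDel_bounds seed p
  have b1 := pvDel_bounds seed (p + 1)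
  have b2 := pvDel_bounds seed (p + 2)
  have b3 := pvDel_bounds seed (p + 3)
  have h0 := pvH_nonneg seed p
  have e1 : pvH seed (p + 1) = (pvH seed p * 256 + pvDel seed p) % 4294967296 := pvH_succ seed p
  have e2 : pvH seed (p + 2) = (pvH seed (p + 1) * 256 + pvDel seed (p + 1)) % 4294967296 := pvH_succ seed (p + 1)
  have e3 : pvH seed (p + 3) = (pvH seed (p + 2) * 256 + pvDel seed (p + 2)) % 4294967296 := pvH_succ seed (p + 2)
  have e4 : pvH seed (p + 4) = (pvH seed (p + 3) * 256 + pvDel seed (p + 3)) % 4294967296 := pvH_succ seed (p + 3)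
  omega

/-- characterization of port A's fold -/
theorem pvA_fold (seed : Int) (n : Nat) :
    (PySem.List.pyRange 0 (n : Int) 1).foldl pvStepA
      (PySem.Dict.empty, seed, PySem.Int.mod seed 10, 0)
    = (pvP seed n, pvSec seed n, pvDig seed n, pvH seed n) := by
  induction n with
  | zero =>
    rw [PySem.List.pyRange_one_eq_nil (by omega)]
    simp [pvP, pvSec, pvDig, pvH]
  | succ n ih =>
    have hc : ((n + 1 : Nat) : Int) = (n : Int) + 1 := by push_cast; ring
    rw [hc, PySem.List.pyRange_one_succ_right (by omega), List.foldl_append, ih]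
    simp only [List.foldl_cons, List.foldl_nil, pvStepA]
    by_cases h3 : 3 ≤ n
    · have h3' : (3 : Int) ≤ (n : Int) := by exact_mod_cast h3
      simp [pvP, pvSec, pvDig, pvH, pvDel, h3, h3']
    · have h3' : ¬ (3 : Int) ≤ (n : Int) := by exact_mod_cast h3
      simp [pvP, pvSec, pvDig, pvH, pvDel, h3, h3']

/-- characterization of port B's first pass -/
theorem pvB1_fold (seed : Int) (n : Nat) :
    (PySem.List.pyRange 0 (n : Int) 1).foldl pvPass1Step (seed, [PySem.Int.mod seed 10])
    = (pvSec seed n, (List.range (n + 1)).map (pvDig seed)) := by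
  induction n with
  | zero =>
    rw [PySem.List.pyRange_one_eq_nil (by omega)]
    simp [pvSec, pvDig]
  | succ n ih =>
    have hc : ((n + 1 : Nat) : Int) = (n : Int) + 1 := by push_cast; ring
    rw [hc, PySem.List.pyRange_one_succ_right (by omega), List.foldl_append, ih]
    simp only [List.foldl_cons, List.foldl_nil, pvPass1Step]
    rw [List.range_succ (n := n + 1), List.map_append]
    rfl

/-- lookups in the digit list -/
theorem pvGetL (seed : Int) (n k : Nat) (hk : k ≤ n) :
    PySem.List.pyGetD ((List.range (n + 1)).map (pvDig seed)) (k : Int) 0 = pvDig seed k := by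
  rw [PySem.List.pyGetD_natCast]
  rw [List.getD_eq_getElem?_getD, List.getElem?_map, List.getElem?_range (by omega)]
  rfl

/-- the repacked window key equals A's masked running history -/
theorem pvKey (seed : Int) (n p : Nat) (hpn : p + 4 ≤ n) :
    (PySem.List.pyRange (((p + 3 : Nat) : Int) - 2) (((p + 3 : Nat) : Int) + 2) 1).foldl
      (fun k j => PySem.Int.bor (k <<< (8:Nat))
        (PySem.Int.mod (PySem.List.pyGetD ((List.range (n + 1)).map (pvDig seed)) j 0
          - PySem.List.pyGetD ((List.range (n + 1)).map (pvDig seed)) (j - 1) 0) 256)) 0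
    = pvH seed (p + 4) := by
  have b0 := pvDel_bounds seed p
  have b1 := pvDel_bounds seed (p + 1)
  have b2 := pvDel_bounds seed (p + 2)
  have b3 := pvDel_bounds seed (p + 3)
  rw [show ((p + 3 : Nat) : Int) - 2 = ((p + 1 : Nat) : Int) by push_cast; ring]
  rw [show ((p + 3 : Nat) : Int) + 2 = ((p + 5 : Nat) : Int) by push_cast; ring]
  rw [PySem.List.pyRange_one_cons (by omega)]
  rw [show ((p + 1 : Nat) : Int) + 1 = ((p + 2 : Nat) : Int) by push_cast; ring]
  rw [PySem.List.pyRange_one_cons (by omega)]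
  rw [show ((p + 2 : Nat) : Int) + 1 = ((p + 3 : Nat) : Int) by push_cast; ring]
  rw [PySem.List.pyRange_one_cons (by omega)]
  rw [show ((p + 3 : Nat) : Int) + 1 = ((p + 4 : Nat) : Int) by push_cast; ring]
  rw [PySem.List.pyRange_one_cons (by omega)]
  rw [show ((p + 4 : Nat) : Int) + 1 = ((p + 5 : Nat) : Int) by push_cast; ring]
  rw [PySem.List.pyRange_one_eq_nil (by omega)]
  simp only [List.foldl_cons, List.foldl_nil]
  rw [show ((p + 1 : Nat) : Int) - 1 = ((p : Nat) : Int) by push_cast; ring]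
  rw [show ((p + 2 : Nat) : Int) - 1 = ((p + 1 : Nat) : Int) by push_cast; ring]
  rw [show ((p + 3 : Nat) : Int) - 1 = ((p + 2 : Nat) : Int) by push_cast; ring]
  rw [show ((p + 4 : Nat) : Int) - 1 = ((p + 3 : Nat) : Int) by push_cast; ring]
  rw [pvGetL seed n p (by omega), pvGetL seed n (p + 1) (by omega),
      pvGetL seed n (p + 2) (by omega), pvGetL seed n (p + 3) (by omega),
      pvGetL seed n (p + 4) (by omega)]
  have d0 : PySem.Int.mod (pvDig seed (p + 1) - pvDig seed p) 256 = pvDel seed p := rfl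
  have d1 : PySem.Int.mod (pvDig seed (p + 2) - pvDig seed (p + 1)) 256 = pvDel seed (p + 1) := rfl
  have d2 : PySem.Int.mod (pvDig seed (p + 3) - pvDig seed (p + 2)) 256 = pvDel seed (p + 2) := rfl
  have d3 : PySem.Int.mod (pvDig seed (p + 4) - pvDig seed (p + 3)) 256 = pvDel seed (p + 3) := rfl
  rw [d0, d1, d2, d3]
  have o0 : PySem.Int.bor ((0 : Int) <<< (8:Nat)) (pvDel seed p) = pvDel seed p := by
    rw [pvOr_eq 0 _ le_rfl b0.1 b0.2]; ring
  rw [o0]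
  rw [pvOr_eq _ _ b0.1 b1.1 b1.2]
  rw [pvOr_eq _ _ (by omega) b2.1 b2.2]
  rw [pvOr_eq _ _ (by omega) b3.1 b3.2]
  exact (pvH_window seed p).symm

theorem pvP_succ (seed : Int) (k : Nat) (h3 : 3 ≤ k) :
    pvP seed (k + 1) = (if (pvP seed k).contains (pvH seed (k + 1)) then pvP seed k
      else (pvP seed k).insert (pvH seed (k + 1)) (pvDig seed (k + 1))) := by
  simp only [pvP]
  rw [if_pos h3]

theorem pvP_le3 (seed : Int) (m : Nat) (hm : m ≤ 3) : pvP seed m = PySem.Dict.empty := by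
  interval_cases m <;> simp [pvP]

/-- characterization of port B's second pass -/
theorem pvB2_fold (seed : Int) (n : Nat) : ∀ m : Nat, m ≤ n →
    (PySem.List.pyRange 3 (m : Int) 1).foldl
      (pvPass2Step ((List.range (n + 1)).map (pvDig seed))) PySem.Dict.empty
    = pvP seed m := by
  intro m
  induction m with
  | zero =>
    intro _
    rw [PySem.List.pyRange_one_eq_nil (by omega)]
    simp [pvP]
  | succ m ih =>
    intro hmn
    by_cases h3 : 3 ≤ m
    · have hc : ((m + 1 : Nat) : Int) = (m : Int) + 1 := by push_cast; ring
      rw [hc, PySem.List.pyRange_one_succ_right (by omega), List.foldl_append, ih (by omega)]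
      simp only [List.foldl_cons, List.foldl_nil]
      obtain ⟨p, rfl⟩ : ∃ p, m = p + 3 := ⟨m - 3, by omega⟩
      simp only [pvPass2Step]
      rw [pvKey seed n p (by omega)]
      rw [show ((p + 3 : Nat) : Int) + 1 = ((p + 4 : Nat) : Int) by push_cast; ring]
      rw [pvGetL seed n (p + 4) (by omega)]
      rw [pvP_succ seed (p + 3) (by omega)]
      rw [show (p + 3 + 1 : Nat) = p + 4 from rfl]
      by_cases hcont : (pvP seed (p + 3)).contains (pvH seed (p + 4))
      · rw [PySem.Dict.setdefault_of_contains _ _ hcont, if_pos hcont]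
      · rw [PySem.Dict.setdefault_of_not_contains _ _ (by simpa using hcont), if_neg hcont]
    · rw [PySem.List.pyRange_one_eq_nil (by omega)]
      simp only [List.foldl_nil]
      rw [pvP_le3 seed (m + 1) (by omega)]

theorem pv_main (seed : Int) (n : Nat) :
    simulate_secret_generation seed (n : Int) = simulate_secret_generation_alt seed (n : Int) := by
  simp only [simulate_secret_generation, simulate_secret_generation_alt]
  rw [pvA_fold seed n, pvB1_fold seed n]
  simp only
  rw [pvB2_fold seed n n le_rfl]

-- ===== VERDICT (by name: the statement is the Claim_ definition above) =====
theorem simulate_secret_generation_spec : Claim_equal_simulate_secret_generation := by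
  intro seed iterations _
  unfold Spec_simulate_secret_generation
  by_cases h : 0 ≤ iterations
  · obtain ⟨n, rfl⟩ : ∃ n : Nat, iterations = (n : Int) := ⟨iterations.toNat, (Int.toNat_of_nonneg h).symm⟩
    exact pv_main seed n
  · have h0 : PySem.List.pyRange 0 iterations 1 = [] := PySem.List.pyRange_one_eq_nil (by omega)
    have h3 : PySem.List.pyRange 3 iterations 1 = [] := PySem.List.pyRange_one_eq_nil (by omega)
    simp [simulate_secret_generation, simulate_secret_generation_alt, h0, h3]
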